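-- pv_equiv track=rewrite | github.com/Machiz/Gear-5-AI | log_filter.py | log_es_valido
-- ===== SOURCE A (Python) =====
-- def log_es_valido(log):
--     estados_encontrados = {"Hand state": False, "Board state": False, "Life state": False, "Trash state": False}
--
--     for key in sorted(log.keys()):
--         paso = log[key]
--         accion = paso.get("action", "")
--
--         if accion == "Hand state" and "cards" in paso:
--             estados_encontrados["Hand state"] = True
--         elif accion == "Board state" and "cards" in paso:
--             estados_encontrados["Board state"] = True
--         elif accion == "Life state" and "life" in paso:
--             estados_encontrados["Life state"] = True
--         elif accion == "Trash state" and "cards" in paso: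
--             estados_encontrados["Trash state"] = True
--
--         if all(estados_encontrados.values()):
--             return True  # ✅ es válido
--
--     return False  # ❌ incompleto
-- ===== SOURCE B (Python) =====
-- def log_es_valido(log):
--     def tiene(accion, campo):
--         return any(p.get("action", "") == accion and campo in p for p in log.values())
--     return (tiene("Hand state", "cards")
--             and tiene("Board state", "cards")
--             and tiene("Life state", "life")
--             and tiene("Trash state", "cards"))
-- ===== Notes on version B (the rewrite author's own statement) =====
-- stated objective: simpler
-- what changed: Replaces the sorted-key walk with a mutated flag dict and early return by four independent any() existence scans over log.values() combined with and; Pre_ only excludes association lists with duplicate outer keys, which cannot arise from a Python dict (A's first-match key lookup vs B's values scan would disagree there).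
import Mathlib
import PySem

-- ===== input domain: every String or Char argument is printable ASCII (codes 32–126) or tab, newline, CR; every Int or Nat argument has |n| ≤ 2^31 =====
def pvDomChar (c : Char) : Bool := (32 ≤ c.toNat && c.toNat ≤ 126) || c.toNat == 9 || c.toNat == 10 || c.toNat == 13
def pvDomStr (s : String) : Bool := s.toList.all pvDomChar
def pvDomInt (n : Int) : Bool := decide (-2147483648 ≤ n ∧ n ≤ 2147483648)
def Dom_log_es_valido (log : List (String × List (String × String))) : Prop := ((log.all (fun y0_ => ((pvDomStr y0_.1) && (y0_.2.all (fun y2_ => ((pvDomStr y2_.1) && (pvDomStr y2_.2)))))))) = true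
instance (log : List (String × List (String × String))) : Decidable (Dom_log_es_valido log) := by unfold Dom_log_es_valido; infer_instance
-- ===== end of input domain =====

-- B replaces A's sorted-key walk with mutated flag dict and early return by four independent
-- existence scans over the log's values combined with `and` (same result; not claimed faster).


-- ===== PORT A =====
def pvEstInit : PySem.Dict String Bool :=
  PySem.Dict.mk [("Hand state", false), ("Board state", false), ("Life state", false), ("Trash state", false)]

def pvStepA (paso : List (String × String)) (est : PySem.Dict String Bool) : PySem.Dict String Bool :=
  let p := PySem.Dict.mk paso
  let accion := p.getD "action" ""
  if accion == "Hand state" && p.contains "cards" then est.insert "Hand state" true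
  else if accion == "Board state" && p.contains "cards" then est.insert "Board state" true
  else if accion == "Life state" && p.contains "life" then est.insert "Life state" true
  else if accion == "Trash state" && p.contains "cards" then est.insert "Trash state" true
  else est

-- the loop body; `log[key]` is ported as getD with default [], exact because the key is drawn from d.keys
def pvLoopA (d : PySem.Dict String (List (String × String))) :
    List String → PySem.Dict String Bool → Bool
  | [], _ => false
  | k :: rest, est =>
    let est' := pvStepA (d.getD k []) est
    if est'.values.all (fun x => x) then true
    else pvLoopA d rest est'

def log_es_valido (log : List (String × List (String × String))) : Bool :=
  let d := PySem.Dict.mk log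
  pvLoopA d (PySem.List.sorted d.keys (fun k => k) false) pvEstInit

-- ===== PORT B =====
def pvTiene (log : List (String × List (String × String))) (accion campo : String) : Bool :=
  (PySem.Dict.mk log).values.any (fun paso =>
    ((PySem.Dict.mk paso).getD "action" "" == accion) && (PySem.Dict.mk paso).contains campo)

def log_es_valido_alt (log : List (String × List (String × String))) : Bool :=
  pvTiene log "Hand state" "cards" && pvTiene log "Board state" "cards" &&
    pvTiene log "Life state" "life" && pvTiene log "Trash state" "cards"

-- ===== PRECONDITION & SPEC =====
-- Pre_ excludes association lists with duplicate outer keys: those do not represent any Python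
-- dict (dict construction collapses duplicates), and A's first-match key lookup over sorted keys
-- and B's values scan would disagree on them.
def Pre_log_es_valido (log : List (String × List (String × String))) : Prop :=
  (log.map Prod.fst).Nodup
instance (log : List (String × List (String × String))) : Decidable (Pre_log_es_valido log) := by
  unfold Pre_log_es_valido; infer_instance

def pvWitness_log_es_valido : (List (String × List (String × String))) :=
  [("1", [("action", "Hand state"), ("cards", "x")]), ("2", [("action", "Life state"), ("life", "9")])]

def Spec_log_es_valido (log : List (String × List (String × String))) (out : Bool) : Prop := out = log_es_valido_alt log
instance (log : List (String × List (String × String))) (out : Bool) : Decidable (Spec_log_es_valido log out) := by unfold Spec_log_es_valido; infer_instance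

-- ===== CLAIM (what is proved, stated in full; the proofs are below) =====
def Claim_equal_log_es_valido : Prop := ∀ (log : List (String × List (String × String))), Dom_log_es_valido log → Pre_log_es_valido log → Spec_log_es_valido log (log_es_valido log)

-- ===== LEMMAS AND PROOFS =====

-- the four per-entry conditions of A's branch chain (= B's any-predicates)
def pvCond (accion campo : String) (paso : List (String × String)) : Bool :=
  ((PySem.Dict.mk paso).getD "action" "" == accion) && (PySem.Dict.mk paso).contains campo

-- the flag dict as a function of its four values
def pvMk (h b l t : Bool) : PySem.Dict String Bool :=
  PySem.Dict.mk [("Hand state", h), ("Board state", b), ("Life state", l), ("Trash state", t)]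

lemma pvMk_insert_hand (h b l t : Bool) : (pvMk h b l t).insert "Hand state" true = pvMk true b l t := by
  cases h <;> cases b <;> cases l <;> cases t <;> decide

lemma pvMk_insert_board (h b l t : Bool) : (pvMk h b l t).insert "Board state" true = pvMk h true l t := by
  cases h <;> cases b <;> cases l <;> cases t <;> decide

lemma pvMk_insert_life (h b l t : Bool) : (pvMk h b l t).insert "Life state" true = pvMk h b true t := by
  cases h <;> cases b <;> cases l <;> cases t <;> decide

lemma pvMk_insert_trash (h b l t : Bool) : (pvMk h b l t).insert "Trash state" true = pvMk h b l true := by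
  cases h <;> cases b <;> cases l <;> cases t <;> decide

lemma pvMk_all (h b l t : Bool) : (pvMk h b l t).values.all (fun x => x) = (h && b && l && t) := by
  cases h <;> cases b <;> cases l <;> cases t <;> decide

lemma pvCond_action (a c : String) (paso : List (String × String))
    (hc : pvCond a c paso = true) : (PySem.Dict.mk paso).getD "action" "" = a := by
  simp [pvCond] at hc; exact hc.1

lemma pvCond_false_of {a c : String} {paso : List (String × String)}
    (hc : pvCond a c paso = true) {a' : String} (c' : String) (hne : a ≠ a') :
    pvCond a' c' paso = false := by
  cases hE : pvCond a' c' paso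
  · rfl
  · exact absurd ((pvCond_action a c paso hc).symm.trans (pvCond_action a' c' paso hE)) hne

lemma pvStepA_eq (paso : List (String × String)) (h b l t : Bool) :
    pvStepA paso (pvMk h b l t) =
      pvMk (h || pvCond "Hand state" "cards" paso) (b || pvCond "Board state" "cards" paso)
           (l || pvCond "Life state" "life" paso) (t || pvCond "Trash state" "cards" paso) := by
  have hstep : pvStepA paso (pvMk h b l t) =
      (if pvCond "Hand state" "cards" paso then (pvMk h b l t).insert "Hand state" true
       else if pvCond "Board state" "cards" paso then (pvMk h b l t).insert "Board state" true
       else if pvCond "Life state" "life" paso then (pvMk h b l t).insert "Life state" true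
       else if pvCond "Trash state" "cards" paso then (pvMk h b l t).insert "Trash state" true
       else pvMk h b l t) := rfl
  rw [hstep]
  cases hH : pvCond "Hand state" "cards" paso
  · cases hB : pvCond "Board state" "cards" paso
    · cases hL : pvCond "Life state" "life" paso
      · cases hT : pvCond "Trash state" "cards" paso
        · simp
        · simp [pvMk_insert_trash]
      · have hT := pvCond_false_of hL "cards" (show "Life state" ≠ "Trash state" by decide)
        simp [hT, pvMk_insert_life]
    · have hL := pvCond_false_of hB "life" (show "Board state" ≠ "Life state" by decide)
      have hT := pvCond_false_of hB "cards" (show "Board state" ≠ "Trash state" by decide)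
      simp [hL, hT, pvMk_insert_board]
  · have hB := pvCond_false_of hH "cards" (show "Hand state" ≠ "Board state" by decide)
    have hL := pvCond_false_of hH "life" (show "Hand state" ≠ "Life state" by decide)
    have hT := pvCond_false_of hH "cards" (show "Hand state" ≠ "Trash state" by decide)
    simp [hB, hL, hT, pvMk_insert_hand]

lemma pvLoopA_spec (d : PySem.Dict String (List (String × String))) (ks : List String)
    (h b l t : Bool) (hne : (h && b && l && t) = false) :
    pvLoopA d ks (pvMk h b l t) =
      ((h || ks.any (fun k => pvCond "Hand state" "cards" (d.getD k []))) &&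
       (b || ks.any (fun k => pvCond "Board state" "cards" (d.getD k []))) &&
       (l || ks.any (fun k => pvCond "Life state" "life" (d.getD k []))) &&
       (t || ks.any (fun k => pvCond "Trash state" "cards" (d.getD k [])))) := by
  induction ks generalizing h b l t with
  | nil => simp [pvLoopA, hne]
  | cons k rest ih =>
    simp only [pvLoopA, pvStepA_eq, pvMk_all, List.any_cons]
    by_cases hall : ((h || pvCond "Hand state" "cards" (d.getD k [])) &&
        (b || pvCond "Board state" "cards" (d.getD k [])) &&
        (l || pvCond "Life state" "life" (d.getD k [])) &&
        (t || pvCond "Trash state" "cards" (d.getD k []))) = true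
    · simp only [hall, if_true]
      have h' := hall
      simp only [Bool.and_eq_true] at h'
      obtain ⟨⟨⟨h1, h2⟩, h3⟩, h4⟩ := h'
      simp [← Bool.or_assoc, h1, h2, h3, h4]
    · rw [if_neg (by simpa using hall), ih _ _ _ _ (by simpa using hall)]
      simp [Bool.or_assoc]

lemma pvPerm_any {α : Type} {l1 l2 : List α} (hp : l1.Perm l2) (f : α → Bool) :
    l1.any f = l2.any f := by
  simp [List.any_eq, hp.mem_iff]

lemma keys_any_eq_values_any (log : List (String × List (String × String)))
    (hnd : (log.map Prod.fst).Nodup) (f : List (String × String) → Bool) :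
    ((PySem.Dict.mk log).keys.any (fun k => f ((PySem.Dict.mk log).getD k []))) =
      ((PySem.Dict.mk log).values.any f) := by
  rw [PySem.Dict.values_eq_map_keys (PySem.Dict.mk log) (by simpa [PySem.Dict.keys] using hnd) [],
    List.any_map]
  rfl

-- ===== VERDICT (by name: the statement is the Claim_ definition above) =====
theorem log_es_valido_spec : Claim_equal_log_es_valido := by
  intro log _ hpre
  unfold Spec_log_es_valido log_es_valido log_es_valido_alt pvTiene
  have hinit : pvEstInit = pvMk false false false false := rfl
  rw [hinit, pvLoopA_spec _ _ _ _ _ _ rfl]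
  have hperm := PySem.List.sorted_perm (PySem.Dict.mk log).keys (fun k : String => k) false
  simp only [Bool.false_or]
  rw [pvPerm_any hperm, pvPerm_any hperm, pvPerm_any hperm, pvPerm_any hperm,
    keys_any_eq_values_any log hpre, keys_any_eq_values_any log hpre,
    keys_any_eq_values_any log hpre, keys_any_eq_values_any log hpre]
  rfl
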